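-- pv_equiv track=rewrite | github.com/TakaIshikawa/blueprint | src/blueprint/task_saved_payment_method_readiness.py | _missing_safeguards
-- ===== SOURCE A (Python) =====
-- from typing import Any, Iterable, Literal, Mapping, TypeVar
--
-- SavedPaymentMethodScenario = Literal[
--     "saved_card",
--     "payment_method_update",
--     "wallet_update",
--     "default_payment_instrument",
--     "card_vaulting",
--     "tokenization",
--     "provider_reference",
--     "customer_payment_update",
--     "payment_method_deletion",
--     "retry_flow",
-- ]
--
-- SavedPaymentMethodSafeguard = Literal[
--     "provider_tokenization",
--     "pci_scope_avoidance",
--     "default_method_audit_trail",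
--     "customer_notification",
--     "retry_idempotency_behavior",
--     "sca_step_up_handling",
--     "deletion_semantics",
--     "support_visibility",
--     "test_coverage",
-- ]
--
-- _SAFEGUARD_ORDER: tuple[SavedPaymentMethodSafeguard, ...] = (
--     "provider_tokenization",
--     "pci_scope_avoidance",
--     "default_method_audit_trail",
--     "customer_notification",
--     "retry_idempotency_behavior",
--     "sca_step_up_handling",
--     "deletion_semantics",
--     "support_visibility",
--     "test_coverage",
-- )
--
-- def _missing_safeguards(
--     scenarios: tuple[SavedPaymentMethodScenario, ...],
--     present: tuple[SavedPaymentMethodSafeguard, ...],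
-- ) -> tuple[SavedPaymentMethodSafeguard, ...]:
--     scenario_set = set(scenarios)
--     required: set[SavedPaymentMethodSafeguard] = {"customer_notification", "support_visibility", "test_coverage"}
--     if scenario_set & {"saved_card", "payment_method_update", "wallet_update", "customer_payment_update"}:
--         required.update({"provider_tokenization", "pci_scope_avoidance", "sca_step_up_handling"})
--     if scenario_set & {"card_vaulting", "tokenization", "provider_reference"}:
--         required.update({"provider_tokenization", "pci_scope_avoidance", "sca_step_up_handling", "support_visibility"})
--     if "default_payment_instrument" in scenario_set:
--         required.update({"default_method_audit_trail", "customer_notification", "support_visibility"})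
--     if "payment_method_deletion" in scenario_set:
--         required.update({"deletion_semantics", "customer_notification", "support_visibility"})
--     if "retry_flow" in scenario_set:
--         required.update({"retry_idempotency_behavior", "customer_notification", "support_visibility"})
--     return tuple(safeguard for safeguard in _SAFEGUARD_ORDER if safeguard in required and safeguard not in present)
-- ===== SOURCE B (Python) =====
-- _SAFEGUARD_ORDER = (
--     "provider_tokenization",
--     "pci_scope_avoidance",
--     "default_method_audit_trail",
--     "customer_notification",
--     "retry_idempotency_behavior",
--     "sca_step_up_handling",
--     "deletion_semantics",
--     "support_visibility",
--     "test_coverage",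
-- )
--
-- _BASE = frozenset({"customer_notification", "support_visibility", "test_coverage"})
-- _CARD = frozenset({"provider_tokenization", "pci_scope_avoidance", "sca_step_up_handling"})
-- _VAULT = _CARD | {"support_visibility"}
--
-- _TABLE = {
--     "saved_card": _CARD,
--     "payment_method_update": _CARD,
--     "wallet_update": _CARD,
--     "customer_payment_update": _CARD,
--     "card_vaulting": _VAULT,
--     "tokenization": _VAULT,
--     "provider_reference": _VAULT,
--     "default_payment_instrument": frozenset({"default_method_audit_trail", "customer_notification", "support_visibility"}),
--     "payment_method_deletion": frozenset({"deletion_semantics", "customer_notification", "support_visibility"}),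
--     "retry_flow": frozenset({"retry_idempotency_behavior", "customer_notification", "support_visibility"}),
-- }
--
-- def _missing_safeguards(scenarios, present):
--     required = set(_BASE)
--     for scenario in scenarios:
--         required |= _TABLE.get(scenario, frozenset())
--     return tuple(s for s in _SAFEGUARD_ORDER if s in required and s not in present)
-- ===== Notes on version B (the rewrite author's own statement) =====
-- stated objective: simpler
-- what changed: Replaces A's chain of five set-intersection/membership branches by a dict mapping each scenario to its required safeguards, folded over the scenario list with set union; the final ordered filter is unchanged.
import Mathlib
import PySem

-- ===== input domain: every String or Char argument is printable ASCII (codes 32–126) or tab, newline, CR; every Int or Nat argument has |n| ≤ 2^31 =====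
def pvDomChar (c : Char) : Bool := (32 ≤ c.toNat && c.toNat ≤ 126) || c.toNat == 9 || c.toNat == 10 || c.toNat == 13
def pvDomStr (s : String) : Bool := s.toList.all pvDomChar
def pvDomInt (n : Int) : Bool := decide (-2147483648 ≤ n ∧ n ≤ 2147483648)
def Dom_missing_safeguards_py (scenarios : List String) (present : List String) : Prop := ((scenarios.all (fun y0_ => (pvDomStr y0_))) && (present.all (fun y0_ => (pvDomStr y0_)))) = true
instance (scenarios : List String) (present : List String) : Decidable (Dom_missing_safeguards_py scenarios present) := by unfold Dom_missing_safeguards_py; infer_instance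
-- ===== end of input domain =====

-- B replaces A's chain of five set-intersection/membership branches by a scenario→safeguards table folded over the scenario list (objective: simpler, data-driven); same return value.

-- ===== PORT A =====
def pvOrder : List String :=
  ["provider_tokenization", "pci_scope_avoidance", "default_method_audit_trail",
   "customer_notification", "retry_idempotency_behavior", "sca_step_up_handling",
   "deletion_semantics", "support_visibility", "test_coverage"]

def missing_safeguards_py (scenarios : List String) (present : List String) : List String :=
  let scenario_set : PySem.Set String := PySem.Set.ofList scenarios
  let required : PySem.Set String :=
    PySem.Set.ofList ["customer_notification", "support_visibility", "test_coverage"]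
  let required :=
    if !(PySem.Set.inter scenario_set (PySem.Set.ofList ["saved_card", "payment_method_update", "wallet_update", "customer_payment_update"])).isEmpty then
      PySem.Set.update required ["provider_tokenization", "pci_scope_avoidance", "sca_step_up_handling"]
    else required
  let required :=
    if !(PySem.Set.inter scenario_set (PySem.Set.ofList ["card_vaulting", "tokenization", "provider_reference"])).isEmpty then
      PySem.Set.update required ["provider_tokenization", "pci_scope_avoidance", "sca_step_up_handling", "support_visibility"]
    else required
  let required :=
    if PySem.Set.contains scenario_set "default_payment_instrument" then
      PySem.Set.update required ["default_method_audit_trail", "customer_notification", "support_visibility"]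
    else required
  let required :=
    if PySem.Set.contains scenario_set "payment_method_deletion" then
      PySem.Set.update required ["deletion_semantics", "customer_notification", "support_visibility"]
    else required
  let required :=
    if PySem.Set.contains scenario_set "retry_flow" then
      PySem.Set.update required ["retry_idempotency_behavior", "customer_notification", "support_visibility"]
    else required
  pvOrder.filter (fun s => PySem.Set.contains required s && !present.contains s)

-- ===== PORT B =====
def pvCard : List String := ["provider_tokenization", "pci_scope_avoidance", "sca_step_up_handling"]
def pvVault : List String := pvCard ++ ["support_visibility"]

def pvTable : PySem.Dict String (List String) :=
  (((((((((PySem.Dict.empty.insert "saved_card" pvCard).insert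
    "payment_method_update" pvCard).insert
    "wallet_update" pvCard).insert
    "customer_payment_update" pvCard).insert
    "card_vaulting" pvVault).insert
    "tokenization" pvVault).insert
    "provider_reference" pvVault).insert
    "default_payment_instrument" ["default_method_audit_trail", "customer_notification", "support_visibility"]).insert
    "payment_method_deletion" ["deletion_semantics", "customer_notification", "support_visibility"]).insert
    "retry_flow" ["retry_idempotency_behavior", "customer_notification", "support_visibility"]

def missing_safeguards_py_alt (scenarios : List String) (present : List String) : List String :=
  let required : PySem.Set String :=
    scenarios.foldl (fun r scenario => PySem.Set.update r (pvTable.getD scenario []))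
      (PySem.Set.ofList ["customer_notification", "support_visibility", "test_coverage"])
  pvOrder.filter (fun s => PySem.Set.contains required s && !present.contains s)

-- ===== PRECONDITION & SPEC =====
def Spec_missing_safeguards_py (scenarios : List String) (present : List String) (out : List String) : Prop := out = missing_safeguards_py_alt scenarios present
instance (scenarios : List String) (present : List String) (out : List String) : Decidable (Spec_missing_safeguards_py scenarios present out) := by unfold Spec_missing_safeguards_py; infer_instance

-- ===== CLAIM (what is proved, stated in full; the proofs are below) =====
def Claim_equal_missing_safeguards_py : Prop := ∀ (scenarios : List String) (present : List String), Dom_missing_safeguards_py scenarios present → Spec_missing_safeguards_py scenarios present (missing_safeguards_py scenarios present)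

-- ===== LEMMAS AND PROOFS =====

-- A's required set, as built by the port (proof helper; identical to the let-chain in the port)
def reqA (scenarios : List String) : PySem.Set String :=
  let scenario_set : PySem.Set String := PySem.Set.ofList scenarios
  let required : PySem.Set String :=
    PySem.Set.ofList ["customer_notification", "support_visibility", "test_coverage"]
  let required :=
    if !(PySem.Set.inter scenario_set (PySem.Set.ofList ["saved_card", "payment_method_update", "wallet_update", "customer_payment_update"])).isEmpty then
      PySem.Set.update required ["provider_tokenization", "pci_scope_avoidance", "sca_step_up_handling"]
    else required
  let required :=
    if !(PySem.Set.inter scenario_set (PySem.Set.ofList ["card_vaulting", "tokenization", "provider_reference"])).isEmpty then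
      PySem.Set.update required ["provider_tokenization", "pci_scope_avoidance", "sca_step_up_handling", "support_visibility"]
    else required
  let required :=
    if PySem.Set.contains scenario_set "default_payment_instrument" then
      PySem.Set.update required ["default_method_audit_trail", "customer_notification", "support_visibility"]
    else required
  let required :=
    if PySem.Set.contains scenario_set "payment_method_deletion" then
      PySem.Set.update required ["deletion_semantics", "customer_notification", "support_visibility"]
    else required
  if PySem.Set.contains scenario_set "retry_flow" then
    PySem.Set.update required ["retry_idempotency_behavior", "customer_notification", "support_visibility"]
  else required

def reqB (scenarios : List String) : PySem.Set String :=
  scenarios.foldl (fun r scenario => PySem.Set.update r (pvTable.getD scenario []))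
    (PySem.Set.ofList ["customer_notification", "support_visibility", "test_coverage"])

-- the common characterisation of both required sets
def ReqSpec (scenarios : List String) (y : String) : Prop :=
  y ∈ (["customer_notification", "support_visibility", "test_coverage"] : List String) ∨
  ((∃ s ∈ scenarios, s = "saved_card" ∨ s = "payment_method_update" ∨ s = "wallet_update" ∨ s = "customer_payment_update") ∧ y ∈ pvCard) ∨
  ((∃ s ∈ scenarios, s = "card_vaulting" ∨ s = "tokenization" ∨ s = "provider_reference") ∧ y ∈ pvVault) ∨
  ("default_payment_instrument" ∈ scenarios ∧ y ∈ (["default_method_audit_trail", "customer_notification", "support_visibility"] : List String)) ∨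
  ("payment_method_deletion" ∈ scenarios ∧ y ∈ (["deletion_semantics", "customer_notification", "support_visibility"] : List String)) ∨
  ("retry_flow" ∈ scenarios ∧ y ∈ (["retry_idempotency_behavior", "customer_notification", "support_visibility"] : List String))

theorem mem_foldl_update {y : String} (scenarios : List String) (init : PySem.Set String) :
    y ∈ scenarios.foldl (fun r s => PySem.Set.update r (pvTable.getD s [])) init ↔
      y ∈ init ∨ ∃ s ∈ scenarios, y ∈ pvTable.getD s [] := by
  induction scenarios generalizing init with
  | nil => simp
  | cons a l ih =>
    simp only [List.foldl_cons, ih, PySem.Set.mem_update, List.mem_cons]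
    constructor
    · rintro (⟨h | h⟩ | ⟨s, hs, hy⟩)
      · exact Or.inl h
      · exact Or.inr ⟨a, Or.inl rfl, h⟩
      · exact Or.inr ⟨s, Or.inr hs, hy⟩
    · rintro (h | ⟨s, rfl | hs, hy⟩)
      · exact Or.inl (Or.inl h)
      · exact Or.inl (Or.inr hy)
      · exact Or.inr ⟨s, hs, hy⟩

theorem getD_pvTable (s : String) (y : String) :
    y ∈ pvTable.getD s [] ↔
      ((s = "saved_card" ∨ s = "payment_method_update" ∨ s = "wallet_update" ∨ s = "customer_payment_update") ∧ y ∈ pvCard) ∨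
      ((s = "card_vaulting" ∨ s = "tokenization" ∨ s = "provider_reference") ∧ y ∈ pvVault) ∨
      (s = "default_payment_instrument" ∧ y ∈ (["default_method_audit_trail", "customer_notification", "support_visibility"] : List String)) ∨
      (s = "payment_method_deletion" ∧ y ∈ (["deletion_semantics", "customer_notification", "support_visibility"] : List String)) ∨
      (s = "retry_flow" ∧ y ∈ (["retry_idempotency_behavior", "customer_notification", "support_visibility"] : List String)) := by
  unfold pvTable
  simp only [PySem.Dict.getD_insert]
  split_ifs with h1 h2 h3 h4 h5 h6 h7 h8 h9 h10 <;> simp_all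

theorem mem_reqB (scenarios : List String) (y : String) :
    y ∈ reqB scenarios ↔ ReqSpec scenarios y := by
  unfold reqB ReqSpec
  rw [mem_foldl_update, PySem.Set.mem_ofList]
  constructor
  · rintro (h | ⟨s, hs, hy⟩)
    · exact Or.inl h
    · rw [getD_pvTable] at hy
      rcases hy with ⟨hk, hy⟩ | ⟨hk, hy⟩ | ⟨hk, hy⟩ | ⟨hk, hy⟩ | ⟨hk, hy⟩
      · exact Or.inr (Or.inl ⟨⟨s, hs, hk⟩, hy⟩)
      · exact Or.inr (Or.inr (Or.inl ⟨⟨s, hs, hk⟩, hy⟩))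
      · subst hk; exact Or.inr (Or.inr (Or.inr (Or.inl ⟨hs, hy⟩)))
      · subst hk; exact Or.inr (Or.inr (Or.inr (Or.inr (Or.inl ⟨hs, hy⟩))))
      · subst hk; exact Or.inr (Or.inr (Or.inr (Or.inr (Or.inr ⟨hs, hy⟩))))
  · rintro (h | ⟨⟨s, hs, hk⟩, hy⟩ | ⟨⟨s, hs, hk⟩, hy⟩ | ⟨hs, hy⟩ | ⟨hs, hy⟩ | ⟨hs, hy⟩)
    · exact Or.inl h
    · exact Or.inr ⟨s, hs, (getD_pvTable s y).2 (Or.inl ⟨hk, hy⟩)⟩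
    · exact Or.inr ⟨s, hs, (getD_pvTable s y).2 (Or.inr (Or.inl ⟨hk, hy⟩))⟩
    · exact Or.inr ⟨_, hs, (getD_pvTable _ y).2 (Or.inr (Or.inr (Or.inl ⟨rfl, hy⟩)))⟩
    · exact Or.inr ⟨_, hs, (getD_pvTable _ y).2 (Or.inr (Or.inr (Or.inr (Or.inl ⟨rfl, hy⟩))))⟩
    · exact Or.inr ⟨_, hs, (getD_pvTable _ y).2 (Or.inr (Or.inr (Or.inr (Or.inr ⟨rfl, hy⟩))))⟩

theorem inter_nonempty_iff (scenarios gs : List String) :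
    (!(PySem.Set.inter (PySem.Set.ofList scenarios) (PySem.Set.ofList gs)).isEmpty) = true ↔
      ∃ s ∈ scenarios, s ∈ gs := by
  rw [Bool.not_eq_eq_eq_not, Bool.not_true, List.isEmpty_eq_false_iff_exists_mem]
  simp [PySem.Set.mem_inter, PySem.Set.mem_ofList]

theorem contains_ofList_iff (xs : List String) (x : String) :
    PySem.Set.contains (PySem.Set.ofList xs) x = true ↔ x ∈ xs := by
  rw [PySem.Set.contains_iff, PySem.Set.mem_ofList]

theorem mem_ite_update (b : Bool) (r : PySem.Set String) (u : List String) (y : String) :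
    (y ∈ (if b = true then PySem.Set.update r u else r)) ↔ (y ∈ r ∨ (b = true ∧ y ∈ u)) := by
  cases b <;> simp [PySem.Set.mem_update]

theorem mem_reqA (scenarios : List String) (y : String) :
    y ∈ reqA scenarios ↔ ReqSpec scenarios y := by
  unfold reqA ReqSpec
  dsimp only
  rw [mem_ite_update, mem_ite_update, mem_ite_update, mem_ite_update, mem_ite_update,
    inter_nonempty_iff, inter_nonempty_iff, contains_ofList_iff, contains_ofList_iff,
    contains_ofList_iff, PySem.Set.mem_ofList]
  simp only [pvCard, pvVault, List.mem_cons, List.mem_append, List.not_mem_nil, or_false]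
  simp only [or_assoc]

-- ===== VERDICT (by name: the statement is the Claim_ definition above) =====
theorem missing_safeguards_py_spec : Claim_equal_missing_safeguards_py := by
  intro scenarios present _
  show missing_safeguards_py scenarios present = missing_safeguards_py_alt scenarios present
  have hA : missing_safeguards_py scenarios present =
      pvOrder.filter (fun s => PySem.Set.contains (reqA scenarios) s && !present.contains s) := rfl
  have hB : missing_safeguards_py_alt scenarios present =
      pvOrder.filter (fun s => PySem.Set.contains (reqB scenarios) s && !present.contains s) := rfl
  rw [hA, hB]
  apply List.filter_congr
  intro s _
  have h : PySem.Set.contains (reqA scenarios) s = PySem.Set.contains (reqB scenarios) s := by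
    rw [Bool.eq_iff_iff, PySem.Set.contains_iff, PySem.Set.contains_iff, mem_reqA, mem_reqB]
  rw [h]
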